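-- pv_equiv track=rewrite | github.com/aaronsb/playtimed | src/playtimed/browser/base.py | match_signature
-- ===== SOURCE A (Python) =====
-- from typing import Optional
--
-- SITE_SIGNATURES = {
--     'Discord': 'discord.com',
--     'YouTube Music': 'music.youtube.com',
--     'YouTube': 'youtube.com',
--     'IXL': 'ixl.com',
--     'Google Search': 'google.com',
--     'Google Docs': 'docs.google.com',
--     'Google Sheets': 'docs.google.com',
--     'Google Slides': 'docs.google.com',
--     'Google Drive': 'drive.google.com',
--     'Google': 'google.com',
--     'Gmail': 'mail.google.com',
--     'Twitch': 'twitch.tv',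
--     'Reddit': 'reddit.com',
--     'Twitter': 'twitter.com',
--     'GitHub': 'github.com',
--     'Netflix': 'netflix.com',
--     'Amazon': 'amazon.com',
--     'Wikipedia': 'wikipedia.org',
--     'Stack Overflow': 'stackoverflow.com',
--     'Coolmath Games': 'coolmathgames.com',
--     'Poki': 'poki.com',
--     'Roblox': 'roblox.com',
--     'ChatGPT': 'chatgpt.com',
--     'Claude': 'claude.ai',
-- }
--
-- def match_signature(title: str) -> Optional[str]:
--     """
--     Try to match a cleaned title against shared site signatures.
--
--     Checks longer signatures first to avoid partial matches.
--     Also checks pipe-separated format: "Page | Site Name".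
--
--     Args:
--         title: Cleaned window title (browser suffix already removed)
--
--     Returns:
--         Domain string if matched, None otherwise
--     """
--     for sig, domain in sorted(SITE_SIGNATURES.items(), key=lambda x: -len(x[0])):
--         if sig in title:
--             return domain
--
--     if ' | ' in title:
--         parts = title.split(' | ')
--         site_name = parts[-1].strip()
--         if site_name in SITE_SIGNATURES:
--             return SITE_SIGNATURES[site_name]
--
--     return None
-- ===== SOURCE B (Python) =====
-- from typing import Optional
--
-- SITE_SIGNATURES = {
--     'Discord': 'discord.com',
--     'YouTube Music': 'music.youtube.com',
--     'YouTube': 'youtube.com',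
--     'IXL': 'ixl.com',
--     'Google Search': 'google.com',
--     'Google Docs': 'docs.google.com',
--     'Google Sheets': 'docs.google.com',
--     'Google Slides': 'docs.google.com',
--     'Google Drive': 'drive.google.com',
--     'Google': 'google.com',
--     'Gmail': 'mail.google.com',
--     'Twitch': 'twitch.tv',
--     'Reddit': 'reddit.com',
--     'Twitter': 'twitter.com',
--     'GitHub': 'github.com',
--     'Netflix': 'netflix.com',
--     'Amazon': 'amazon.com',
--     'Wikipedia': 'wikipedia.org',
--     'Stack Overflow': 'stackoverflow.com',
--     'Coolmath Games': 'coolmathgames.com',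
--     'Poki': 'poki.com',
--     'Roblox': 'roblox.com',
--     'ChatGPT': 'chatgpt.com',
--     'Claude': 'claude.ai',
-- }
--
-- def match_signature(title: str) -> Optional[str]:
--     """Collect the signatures occurring in the title and look up the longest one
--     (Python's max keeps the first maximal element, i.e. earlier dict entries win
--     length ties, matching A's stable descending-length sort)."""
--     hits = [s for s in SITE_SIGNATURES if s in title]
--     if hits:
--         return SITE_SIGNATURES[max(hits, key=len)]
--
--     if ' | ' in title:
--         return SITE_SIGNATURES.get(title.split(' | ')[-1].strip())
--
--     return None
-- ===== Notes on version B (the rewrite author's own statement) =====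
-- stated objective: idiomatic
-- what changed: Replaced sort-signatures-by-descending-length-then-return-first-substring-hit with a comprehension collecting the matching signatures, max(hits, key=len) (Python's max keeps the first maximal element, so earlier dict entries win length ties exactly like A's stable sort) and one dict lookup; the pipe-split fallback becomes a direct SITE_SIGNATURES.get.
import Mathlib
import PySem

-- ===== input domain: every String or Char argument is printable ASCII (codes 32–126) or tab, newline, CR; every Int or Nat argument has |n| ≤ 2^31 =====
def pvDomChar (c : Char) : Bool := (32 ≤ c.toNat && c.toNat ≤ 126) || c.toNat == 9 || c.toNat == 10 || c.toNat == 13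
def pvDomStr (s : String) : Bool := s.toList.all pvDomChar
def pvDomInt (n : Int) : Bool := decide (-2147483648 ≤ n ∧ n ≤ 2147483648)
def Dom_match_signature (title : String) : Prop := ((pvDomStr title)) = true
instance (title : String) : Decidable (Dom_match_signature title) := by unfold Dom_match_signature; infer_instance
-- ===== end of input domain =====

-- B replaces A's sort-by-descending-length-then-first-hit with a list comprehension of the
-- matching signatures followed by max(hits, key=len) (first maximal wins length ties, like
-- A's stable sort) and a direct dict lookup (alternative decomposition, no sort, no scan loop).

-- ===== PORT A =====
-- SITE_SIGNATURES as an insertion-ordered association list (shared constant of the module)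
def sigList : List (String × String) :=
  [("Discord", "discord.com"), ("YouTube Music", "music.youtube.com"), ("YouTube", "youtube.com"),
   ("IXL", "ixl.com"), ("Google Search", "google.com"), ("Google Docs", "docs.google.com"),
   ("Google Sheets", "docs.google.com"), ("Google Slides", "docs.google.com"), ("Google Drive", "drive.google.com"),
   ("Google", "google.com"), ("Gmail", "mail.google.com"), ("Twitch", "twitch.tv"),
   ("Reddit", "reddit.com"), ("Twitter", "twitter.com"), ("GitHub", "github.com"),
   ("Netflix", "netflix.com"), ("Amazon", "amazon.com"), ("Wikipedia", "wikipedia.org"),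
   ("Stack Overflow", "stackoverflow.com"), ("Coolmath Games", "coolmathgames.com"), ("Poki", "poki.com"),
   ("Roblox", "roblox.com"), ("ChatGPT", "chatgpt.com"), ("Claude", "claude.ai")]

-- A's pipe-separated fallback: "if ' | ' in title: … ; if site_name in SITE_SIGNATURES: return SITE_SIGNATURES[site_name]"
def pipeFallback (title : String) : Option String :=
  if PySem.Str.isIn " | " title then
    match PySem.Str.split? title " | " with
    | none => none          -- unreachable: separator " | " ≠ ""
    | some parts =>
      match PySem.List.pyGet? parts (-1) with
      | none => none        -- unreachable: split always yields ≥ 1 part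
      | some last =>
        match (PySem.Dict.ofList sigList).get? (PySem.Str.strip last) with
        | some d => some d
        | none => none
  else none

-- A's for-loop over the sorted items, returning on the first substring hit
def matchLoopA (title : String) : List (String × String) → Option String
  | [] => none
  | (sig, dom) :: rest =>
    if PySem.Str.isIn sig title then some dom else matchLoopA title rest

def match_signature (title : String) : Option String :=
  match matchLoopA title (PySem.List.sorted sigList (fun x => -(PySem.Str.len x.1 : Int)) false) with
  | some d => some d
  | none => pipeFallback title

-- ===== PORT B =====
-- the comprehension: hits = [s for s in SITE_SIGNATURES if s in title]
def hitsOf (title : String) : List String :=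
  (sigList.map Prod.fst).filter (fun s => PySem.Str.isIn s title)

def match_signature_alt (title : String) : Option String :=
  if (hitsOf title).isEmpty then
    -- fallback: SITE_SIGNATURES.get(title.split(' | ')[-1].strip()) under the ' | ' guard
    if PySem.Str.isIn " | " title then
      match PySem.Str.split? title " | " with
      | none => none        -- unreachable: separator " | " ≠ ""
      | some parts =>
        match PySem.List.pyGet? parts (-1) with
        | none => none      -- unreachable: split always yields ≥ 1 part
        | some last => (PySem.Dict.ofList sigList).get? (PySem.Str.strip last)
    else none
  else
    -- return SITE_SIGNATURES[max(hits, key=len)] ; the key always exists (none = KeyError, unreachable)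
    match PySem.List.max? (hitsOf title) (fun s => (PySem.Str.len s : Int)) with
    | some best => (PySem.Dict.ofList sigList).get? best
    | none => none          -- unreachable: hits nonempty

-- ===== PRECONDITION & SPEC =====
def Spec_match_signature (title : String) (out : Option String) : Prop := out = match_signature_alt title
instance (title : String) (out : Option String) : Decidable (Spec_match_signature title out) := by unfold Spec_match_signature; infer_instance

-- ===== CLAIM =====
def Claim_equal_match_signature : Prop := ∀ (title : String), Dom_match_signature title → Spec_match_signature title (match_signature title)

-- ===== LEMMAS AND PROOFS =====

-- the sorted signature list, evaluated once (A sorts a constant)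
def sortedSigs : List (String × String) :=
  [("Stack Overflow", "stackoverflow.com"), ("Coolmath Games", "coolmathgames.com"),
   ("YouTube Music", "music.youtube.com"), ("Google Search", "google.com"), ("Google Sheets", "docs.google.com"),
   ("Google Slides", "docs.google.com"), ("Google Drive", "drive.google.com"), ("Google Docs", "docs.google.com"),
   ("Wikipedia", "wikipedia.org"), ("Discord", "discord.com"), ("YouTube", "youtube.com"), ("Twitter", "twitter.com"),
   ("Netflix", "netflix.com"), ("ChatGPT", "chatgpt.com"), ("Google", "google.com"), ("Twitch", "twitch.tv"),
   ("Reddit", "reddit.com"), ("GitHub", "github.com"), ("Amazon", "amazon.com"), ("Roblox", "roblox.com"),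
   ("Claude", "claude.ai"), ("Gmail", "mail.google.com"), ("Poki", "poki.com"), ("IXL", "ixl.com")]

lemma sorted_eval :
    PySem.List.sorted sigList (fun x => -(PySem.Str.len x.1 : Int)) false = sortedSigs := by
  decide

def lenK (s : String) : Int := (PySem.Str.len s : Int)
def sortedKeys : List String := sortedSigs.map Prod.fst
-- rank: strictly larger for keys earlier in sortedKeys, i.e. (length desc, insertion order)
def krnk (s : String) : Nat := sortedKeys.length - sortedKeys.idxOf s

-- concrete facts about the constant lists
lemma fact_pairS : sortedSigs.Pairwise (fun a b => krnk b.1 < krnk a.1) := by decide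
lemma fact_pairK : (sigList.map Prod.fst).Pairwise (fun a b => (lenK a < lenK b ↔ krnk a < krnk b)) := by decide
lemma fact_inj : ∀ a ∈ sigList.map Prod.fst, ∀ b ∈ sigList.map Prod.fst, krnk a = krnk b → a = b := by decide
lemma fact_SK : ∀ e ∈ sortedSigs, e.1 ∈ sigList.map Prod.fst := by decide
lemma fact_KS : ∀ k ∈ sigList.map Prod.fst, ∃ e ∈ sortedSigs, e.1 = k := by decide
lemma fact_lookup : ∀ e ∈ sortedSigs, (PySem.Dict.ofList sigList).get? e.1 = some e.2 := by decide

-- A's loop is 'first entry satisfying the predicate', projected to the domain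
def firstEnt (p : String → Bool) : List (String × String) → Option (String × String)
  | [] => none
  | e :: rest => if p e.1 then some e else firstEnt p rest

lemma loopA_eq (title : String) :
    ∀ S, matchLoopA title S = (firstEnt (fun s => PySem.Str.isIn s title) S).map (fun e => e.2) := by
  intro S
  induction S with
  | nil => rfl
  | cons e rest ih =>
    obtain ⟨sig, dom⟩ := e
    simp only [matchLoopA, firstEnt, ih]
    split <;> rfl

lemma firstEnt_none (p : String → Bool) :
    ∀ S, firstEnt p S = none ↔ ∀ e ∈ S, p e.1 = false := by
  intro S
  induction S with
  | nil => simp [firstEnt]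
  | cons e rest ih =>
    simp only [firstEnt]
    by_cases hp : p e.1 = true
    · simp [hp]
    · have hp' : p e.1 = false := Bool.of_not_eq_true hp
      simp [hp', ih]

lemma firstEnt_some (p : String → Bool) :
    ∀ S, S.Pairwise (fun a b => krnk b.1 < krnk a.1) →
      ∀ x, firstEnt p S = some x →
        x ∈ S ∧ p x.1 = true ∧ ∀ y ∈ S, p y.1 = true → krnk y.1 ≤ krnk x.1 := by
  intro S
  induction S with
  | nil => intro _ x h; simp [firstEnt] at h
  | cons e rest ih =>
    intro hpair x h
    obtain ⟨hhead, htail⟩ := List.pairwise_cons.mp hpair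
    simp only [firstEnt] at h
    by_cases hp : p e.1 = true
    · rw [if_pos hp] at h
      injection h with h; subst h
      refine ⟨List.mem_cons_self, hp, ?_⟩
      intro y hy _
      rcases List.mem_cons.mp hy with rfl | hy'
      · exact le_rfl
      · exact le_of_lt (hhead y hy')
    · rw [if_neg hp] at h
      obtain ⟨hm, hpx, hall⟩ := ih htail x h
      refine ⟨List.mem_cons_of_mem _ hm, hpx, ?_⟩
      intro y hy hpy
      rcases List.mem_cons.mp hy with rfl | hy'
      · exact absurd hpy hp
      · exact hall y hy' hpy

-- the step of Python's max(..., key=len): keep the first maximal element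
def maxStep (acc : Option String) (x : String) : Option String :=
  match acc with
  | none => some x
  | some m => if lenK m < lenK x then some x else some m

lemma max?_eq_foldl (L : List String) :
    PySem.List.max? L lenK = L.foldl maxStep none := by
  unfold PySem.List.max?
  congr 1
  funext acc x
  cases acc <;> rfl

lemma maxLoop_some :
    ∀ (L : List String) (acc : Option String),
      L.Pairwise (fun a b => (lenK a < lenK b ↔ krnk a < krnk b)) →
      (∀ m, acc = some m → ∀ y ∈ L, (lenK m < lenK y ↔ krnk m < krnk y)) →
      ∀ b, L.foldl maxStep acc = some b →
        (acc = some b ∨ b ∈ L) ∧ (∀ m, acc = some m → krnk m ≤ krnk b) ∧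
        (∀ y ∈ L, krnk y ≤ krnk b) := by
  intro L
  induction L with
  | nil =>
    intro acc _ _ b h
    simp only [List.foldl_nil] at h
    exact ⟨Or.inl h, fun m hm => by rw [hm] at h; cases h; exact le_rfl, by simp⟩
  | cons x rest ih =>
    intro acc hpair hinv b h
    obtain ⟨hhead, htail⟩ := List.pairwise_cons.mp hpair
    simp only [List.foldl_cons] at h
    rcases hacc : acc with _ | m
    · -- acc = none: the accumulator becomes some x
      subst hacc
      have h' : rest.foldl maxStep (some x) = some b := h
      obtain ⟨hsrc, haccb, hrest⟩ :=
        ih (some x) htail (by rintro z hz; injection hz with hz; subst hz; exact hhead) b h'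
      have hx : krnk x ≤ krnk b := haccb x rfl
      refine ⟨?_, by rintro m ⟨⟩, ?_⟩
      · rcases hsrc with hz | hm
        · injection hz with hz; subst hz; exact Or.inr List.mem_cons_self
        · exact Or.inr (List.mem_cons_of_mem _ hm)
      · intro y hy
        rcases List.mem_cons.mp hy with rfl | hy'
        · exact hx
        · exact hrest y hy'
    · subst hacc
      simp only [maxStep] at h
      by_cases hlt : lenK m < lenK x
      · rw [if_pos hlt] at h
        obtain ⟨hsrc, haccb, hrest⟩ :=
          ih (some x) htail (by rintro z hz; injection hz with hz; subst hz; exact hhead) b h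
        have hxb : krnk x ≤ krnk b := haccb x rfl
        have hmx : krnk m < krnk x := (hinv m rfl x List.mem_cons_self).mp hlt
        refine ⟨?_, ?_, ?_⟩
        · rcases hsrc with hz | hm'
          · injection hz with hz; subst hz; exact Or.inr List.mem_cons_self
          · exact Or.inr (List.mem_cons_of_mem _ hm')
        · rintro m' hm'; injection hm' with hm'; subst hm'; omega
        · intro y hy
          rcases List.mem_cons.mp hy with rfl | hy'
          · exact hxb
          · exact hrest y hy'
      · rw [if_neg hlt] at h
        obtain ⟨hsrc, haccb, hrest⟩ :=
          ih (some m) htail (fun z hz y hy => by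
            injection hz with h'; subst h'; exact hinv m rfl y (List.mem_cons_of_mem _ hy)) b h
        have hmb : krnk m ≤ krnk b := haccb m rfl
        refine ⟨?_, ?_, ?_⟩
        · rcases hsrc with hz | hm'
          · exact Or.inl hz
          · exact Or.inr (List.mem_cons_of_mem _ hm')
        · rintro m' hm'; injection hm' with hm'; subst hm'; exact hmb
        · intro y hy
          rcases List.mem_cons.mp hy with rfl | hy'
          · have : ¬ krnk m < krnk y := fun hr => hlt ((hinv m rfl y List.mem_cons_self).mpr hr)
            omega
          · exact hrest y hy'

-- the two fallbacks agree: A re-matches the lookup's option, B returns dict.get directly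
lemma fallback_eq (title : String) :
    pipeFallback title =
      (if PySem.Str.isIn " | " title then
        match PySem.Str.split? title " | " with
        | none => none
        | some parts =>
          match PySem.List.pyGet? parts (-1) with
          | none => none
          | some last => (PySem.Dict.ofList sigList).get? (PySem.Str.strip last)
      else none) := by
  unfold pipeFallback
  split_ifs
  · cases PySem.Str.split? title " | " with
    | none => rfl
    | some parts =>
      simp only
      cases PySem.List.pyGet? parts (-1) with
      | none => rfl
      | some last =>
        simp only
        cases (PySem.Dict.ofList sigList).get? (PySem.Str.strip last) <;> rfl
  · rfl

-- ===== VERDICT =====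
theorem match_signature_spec : Claim_equal_match_signature := by
  intro title _
  unfold Spec_match_signature
  show match_signature title = match_signature_alt title
  unfold match_signature match_signature_alt
  rw [sorted_eval, loopA_eq]
  set p : String → Bool := fun s => PySem.Str.isIn s title with hp
  rcases hF : firstEnt p sortedSigs with _ | x
  · -- no signature matches: hits is empty and both sides take the fallback
    have hall := (firstEnt_none p sortedSigs).mp hF
    have hhits : hitsOf title = [] := by
      unfold hitsOf
      rw [List.filter_eq_nil_iff]
      intro k hk
      obtain ⟨e, he, rfl⟩ := fact_KS k hk
      have h := hall e he
      rw [hp] at h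
      simp only [Bool.not_eq_true]
      exact h
    rw [hhits]
    exact fallback_eq title
  · -- some signature matches: B's hits are nonempty and max picks the same entry
    obtain ⟨hmem, hpx, hmax⟩ := firstEnt_some p sortedSigs fact_pairS x hF
    have hx1 : x.1 ∈ hitsOf title := by
      unfold hitsOf
      refine List.mem_filter.mpr ⟨fact_SK x hmem, ?_⟩
      rw [hp] at hpx
      exact hpx
    have hne : (hitsOf title).isEmpty = false := by
      cases hh : hitsOf title with
      | nil => rw [hh] at hx1; cases hx1
      | cons a t => simp
    rw [hne]
    have hpairH : (hitsOf title).Pairwise (fun a b => (lenK a < lenK b ↔ krnk a < krnk b)) :=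
      List.Pairwise.filter _ fact_pairK
    rcases hM : PySem.List.max? (hitsOf title) lenK with _ | b
    · exfalso
      have h0 : hitsOf title = [] := by
        have := PySem.List.max?_eq_none_iff (xs := hitsOf title) (key := lenK)
        exact this.mp hM
      rw [h0] at hne
      simp at hne
    · have hMf := hM
      rw [max?_eq_foldl] at hMf
      obtain ⟨hsrc, _, hmaxB⟩ := maxLoop_some (hitsOf title) none hpairH (by rintro m ⟨⟩) b hMf
      have hbmem : b ∈ hitsOf title := by
        rcases hsrc with hz | hm
        · cases hz
        · exact hm
      have hbK : b ∈ sigList.map Prod.fst := (List.mem_filter.mp hbmem).1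
      have hbp : p b = true := by
        rw [hp]
        exact (List.mem_filter.mp hbmem).2
      have h1 : krnk x.1 ≤ krnk b := hmaxB x.1 hx1
      have h2 : krnk b ≤ krnk x.1 := by
        obtain ⟨e, he, rfl⟩ := fact_KS b hbK
        exact hmax e he hbp
      have hbx : b = x.1 := fact_inj b hbK x.1 (fact_SK x hmem) (Nat.le_antisymm h2 h1)
      rw [show PySem.List.max? (hitsOf title) (fun s => (PySem.Str.len s : Int)) = some b from hM]
      show some x.2 = (PySem.Dict.ofList sigList).get? b
      rw [hbx]
      exact (fact_lookup x hmem).symm
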